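-- pv_equiv track=rewrite | github.com/vharatian/InverseIFHunter | providers/openai_client.py | _find_json_array
-- ===== SOURCE A (Python) =====
-- from typing import Dict, Any, Optional, List, AsyncGenerator
--
-- def _find_json_array(text: str) -> Optional[str]:
--     """Find the outermost JSON array in text using balanced bracket matching."""
--     start = text.find('[')
--     if start == -1:
--         return None
--     depth = 0
--     in_string = False
--     escape_next = False
--     for i in range(start, len(text)):
--         ch = text[i]
--         if escape_next:
--             escape_next = False
--             continue
--         if ch == '\\' and in_string:
--             escape_next = True
--             continue
--         if ch == '"' and not escape_next:
--             in_string = not in_string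
--             continue
--         if in_string:
--             continue
--         if ch == '[':
--             depth += 1
--         elif ch == ']':
--             depth -= 1
--             if depth == 0:
--                 return text[start:i + 1]
--     return None
-- ===== SOURCE B (Python) =====
-- from typing import Optional
--
-- def _find_json_array(text: str) -> Optional[str]:
--     """Find the outermost JSON array in text using balanced bracket matching."""
--     start = text.find('[')
--     if start == -1:
--         return None
--     depth = 0
--     pos = start
--     inside = False
--     for seg in text[start:].split('"'):
--         if inside:
--             # the quote after this in-string segment is escaped iff the segment
--             # ends in an odd run of backslashes; then the string continues
--             inside = (len(seg) - len(seg.rstrip('\\'))) % 2 == 1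
--         else:
--             for k in range(len(seg)):
--                 ch = seg[k]
--                 if ch == '[':
--                     depth += 1
--                 elif ch == ']':
--                     depth -= 1
--                     if depth == 0:
--                         return text[start:pos + k + 1]
--             inside = True
--         pos += len(seg) + 1
--     return None
-- ===== Notes on version B (the rewrite author's own statement) =====
-- stated objective: alternative
-- what changed: A's single per-character state machine (in_string/escape_next flags) is replaced by staged passes: split the text on the double-quote character so segments alternate outside/inside string, decide whether each closing quote is escaped by the parity of the inside segment's trailing backslash run (rstrip), and run bracket matching only over outside segments; no per-character escape state is kept.
import Mathlib
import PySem

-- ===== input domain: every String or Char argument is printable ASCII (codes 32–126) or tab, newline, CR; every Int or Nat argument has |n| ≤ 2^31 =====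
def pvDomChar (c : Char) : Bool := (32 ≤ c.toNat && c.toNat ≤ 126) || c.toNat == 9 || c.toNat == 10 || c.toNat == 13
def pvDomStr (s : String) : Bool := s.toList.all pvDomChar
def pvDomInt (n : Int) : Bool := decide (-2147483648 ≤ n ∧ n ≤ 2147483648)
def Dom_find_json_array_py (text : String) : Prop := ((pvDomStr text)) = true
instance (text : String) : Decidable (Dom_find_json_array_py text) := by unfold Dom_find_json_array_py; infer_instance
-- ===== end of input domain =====

-- B replaces A's per-character in_string/escape_next state machine by staged passes: split the
-- text on the double-quote character (segments alternate outside/inside string), judge each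
-- closing quote by the parity of the inside segment's trailing backslash run, and bracket-match
-- only outside segments (objective: alternative).

-- ===== PORT A =====
-- A's for-loop over range(start, len(text)): structural recursion on the remaining characters,
-- carrying the index i and the state (depth, in_string, escape_next) exactly as in the Python.
def pvAloop (text : String) (start : Int) (cs : List Char) (i depth : Int)
    (inStr esc : Bool) : Option String :=
  match cs with
  | [] => none
  | ch :: rest =>
    if esc then pvAloop text start rest (i + 1) depth inStr false
    else if ch = '\\' ∧ inStr then pvAloop text start rest (i + 1) depth inStr true
    else if ch = '"' ∧ ¬ esc then pvAloop text start rest (i + 1) depth (!inStr) esc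
    else if inStr then pvAloop text start rest (i + 1) depth inStr esc
    else if ch = '[' then pvAloop text start rest (i + 1) (depth + 1) inStr esc
    else if ch = ']' then
      if depth - 1 = 0 then some (PySem.Str.slice text (some start) (some (i + 1)))
      else pvAloop text start rest (i + 1) (depth - 1) inStr esc
    else pvAloop text start rest (i + 1) depth inStr esc

def find_json_array_py (text : String) : Option String :=
  let start := PySem.Str.find text "["
  if start = -1 then none
  else pvAloop text start (text.toList.drop start.toNat) start 0 false false

-- ===== PORT B =====
-- seg.rstrip('\\') : drop the trailing run of backslashes
def pvRstripBS (s : List Char) : List Char := (s.reverse.dropWhile (· == '\\')).reverse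

-- Source B's inner `for k in range(len(seg))` bracket loop over one outside segment:
-- either returns the slice (early return) or hands the updated depth back to the segment loop.
def pvBscan (text : String) (start pos : Int) (seg : List Char) (k depth : Int) :
    String ⊕ Int :=
  match seg with
  | [] => .inr depth
  | ch :: rest =>
    if ch = '[' then pvBscan text start pos rest (k + 1) (depth + 1)
    else if ch = ']' then
      if depth - 1 = 0 then .inl (PySem.Str.slice text (some start) (some (pos + k + 1)))
      else pvBscan text start pos rest (k + 1) (depth - 1)
    else pvBscan text start pos rest (k + 1) depth

-- Source B's `for seg in text[start:].split('"')` loop, with the alternating inside flag.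
def pvBsegs (text : String) (start : Int) (segs : List (List Char)) (pos depth : Int)
    (inside : Bool) : Option String :=
  match segs with
  | [] => none
  | seg :: rest =>
    if inside then
      pvBsegs text start rest (pos + seg.length + 1) depth
        (decide ((seg.length - (pvRstripBS seg).length) % 2 = 1))
    else
      match pvBscan text start pos seg 0 depth with
      | .inl s => some s
      | .inr d' => pvBsegs text start rest (pos + seg.length + 1) d' true

def find_json_array_py_alt (text : String) : Option String :=
  let start := PySem.Str.find text "["
  if start = -1 then none
  else pvBsegs text start ((text.toList.drop start.toNat).splitOn '"') start 0 false

-- ===== PRECONDITION & SPEC =====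
def Spec_find_json_array_py (text : String) (out : Option String) : Prop := out = find_json_array_py_alt text
instance (text : String) (out : Option String) : Decidable (Spec_find_json_array_py text out) := by unfold Spec_find_json_array_py; infer_instance

-- ===== CLAIM (what is proved, stated in full; the proofs are below) =====
def Claim_equal_find_json_array_py : Prop := ∀ (text : String), Dom_find_json_array_py text → Spec_find_json_array_py text (find_json_array_py text)

-- ===== LEMMAS AND PROOFS =====

-- joining the splitOn-'"' segments back with quotes (proof-side inverse of split)
def pvJoinQ : List (List Char) → List Char
  | [] => []
  | [s] => s
  | s :: rest => s ++ '"' :: pvJoinQ rest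

-- A's escape machine inside a string: is the quote following this segment escaped?
def pvEscQ : List Char → Bool
  | [] => false
  | ['\\'] => true
  | '\\' :: _ :: r => pvEscQ r
  | _ :: r => pvEscQ r

-- trailing backslash run length
def pvTrail (s : List Char) : Nat := (s.reverse.takeWhile (· == '\\')).length

theorem pvJoinQ_splitOn (cs : List Char) : pvJoinQ (cs.splitOn '"') = cs := by
  induction cs with
  | nil => rfl
  | cons c rest ih =>
    simp only [List.splitOn, List.splitOnP_cons] at *
    by_cases h : c = '"'
    · rw [if_pos (by simp [h])]
      rcases hs : rest.splitOnP (· == '"') with - | ⟨h1, t1⟩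
      · exact absurd hs (List.splitOnP_ne_nil _ _)
      · rw [hs] at ih; rw [h]; simp [pvJoinQ, ih]
    · rw [if_neg (by simp [h])]
      rcases hs : rest.splitOnP (· == '"') with - | ⟨h1, t1⟩
      · exact absurd hs (List.splitOnP_ne_nil _ _)
      · rw [hs] at ih
        cases t1 <;> simp [pvJoinQ] at ih ⊢ <;> simp [ih]

theorem pvSplit_no_quote (cs : List Char) : ∀ s ∈ cs.splitOn '"', '"' ∉ s := by
  induction cs with
  | nil =>
    intro s hs
    have : s = [] := by simpa [List.splitOn] using hs
    simp [this]
  | cons c rest ih =>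
    intro s hs
    simp only [List.splitOn, List.splitOnP_cons] at hs ih
    by_cases h : c = '"'
    · rw [if_pos (by simp [h])] at hs
      rcases List.mem_cons.mp hs with hs | hs
      · simp [hs]
      · exact ih s hs
    · rw [if_neg (by simp [h])] at hs
      rcases hq : rest.splitOnP (· == '"') with - | ⟨h1, t1⟩
      · exact absurd hq (List.splitOnP_ne_nil _ _)
      · rw [hq] at hs ih
        simp only [List.modifyHead_cons] at hs
        rcases List.mem_cons.mp hs with hs | hs
        · subst hs
          have hh1 := ih h1 (List.mem_cons_self ..)
          intro hm
          rcases List.mem_cons.mp hm with hm | hm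
          · exact h hm.symm
          · exact hh1 hm
        · exact ih s (List.mem_cons.mpr (Or.inr hs))

theorem pvAllTW (s : List Char) (h : (s.all fun x => x == '\\') = true) :
    List.takeWhile (fun x => x == '\\') s.reverse = s.reverse :=
  List.takeWhile_eq_self_iff.mpr fun x hx => List.all_eq_true.mp h x (List.mem_reverse.mp hx)

theorem pvTrail_cons (x : Char) (s : List Char) :
    pvTrail (x :: s) = pvTrail s + (if s.all (· == '\\') && (x == '\\') then 1 else 0) := by
  unfold pvTrail
  rw [List.reverse_cons, List.takeWhile_append]
  by_cases hall : (s.all fun x => x == '\\') = true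
  · have hself := pvAllTW s hall
    rw [if_pos (by rw [hself])]
    by_cases hx : x = '\\'
    · have hxb : (x == '\\') = true := by simp [hx]
      simp [hself, List.takeWhile, hxb, hall]
    · have hxb : (x == '\\') = false := by simp [hx]
      simp [hself, List.takeWhile, hxb, hall]
  · have hne : ¬ (List.takeWhile (fun x => x == '\\') s.reverse).length = s.reverse.length := by
      intro hc
      refine hall (List.all_eq_true.mpr fun a ha => ?_)
      have heq : List.takeWhile (fun x => x == '\\') s.reverse = s.reverse :=
        (List.takeWhile_prefix _).eq_of_length (by simpa using hc)
      have hmem : a ∈ List.takeWhile (fun x => x == '\\') s.reverse := by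
        rw [heq]; exact List.mem_reverse.mpr ha
      exact List.mem_takeWhile_imp (p := fun x => x == '\\') hmem
    rw [if_neg hne]
    have hz : (s.all (· == '\\') && (x == '\\')) = false := by
      simp only [Bool.and_eq_false_iff]
      left; simpa using hall
    simp [hz]

theorem pvEscQ_parity : ∀ (n : Nat) (s : List Char), s.length ≤ n →
    pvEscQ s = decide (pvTrail s % 2 = 1) := by
  intro n
  induction n using Nat.strong_induction_on with
  | _ n ihn =>
    intro s hlen
    match s with
    | [] => simp [pvEscQ, pvTrail]
    | c :: rest =>
      by_cases hc : c = '\\'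
      · subst hc
        match rest with
        | [] => simp [pvEscQ, pvTrail, List.takeWhile]
        | c2 :: r2 =>
          have h2 : r2.length < n := by simp at hlen; omega
          rw [show pvEscQ ('\\' :: c2 :: r2) = pvEscQ r2 from rfl,
            ihn r2.length h2 r2 le_rfl]
          rw [pvTrail_cons, pvTrail_cons]
          rw [decide_eq_decide]
          by_cases hb : c2 = '\\' <;> by_cases hr : (r2.all fun x => x == '\\') = true <;>
            first
            | (simp [hb, hr, List.all_cons]; omega)
            | simp [hb, hr, List.all_cons]
      · have h1 : rest.length < n := by simp at hlen; omega
        rw [show pvEscQ (c :: rest) = pvEscQ rest from by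
          rw [pvEscQ.eq_def]; cases rest <;> simp [hc],
          ihn rest.length h1 rest le_rfl]
        rw [pvTrail_cons]
        simp [hc]

theorem pvTrail_eq_sub (s : List Char) : s.length - (pvRstripBS s).length = pvTrail s := by
  unfold pvRstripBS pvTrail
  have h := List.takeWhile_append_dropWhile (p := (· == '\\')) (l := s.reverse)
  have hlen : (s.reverse.takeWhile (· == '\\')).length
      + (s.reverse.dropWhile (· == '\\')).length = s.length := by
    rw [← List.length_append, h, List.length_reverse]
  simp only [List.length_reverse]
  omega

-- one-step unfolding lemmas for pvAloop
theorem pvAloop_nil (text : String) (start i depth : Int) (inStr esc : Bool) :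
    pvAloop text start [] i depth inStr esc = none := by
  simp [pvAloop]

theorem pvAloop_esc (text : String) (start : Int) (ch : Char) (rest : List Char)
    (i depth : Int) (inStr : Bool) :
    pvAloop text start (ch :: rest) i depth inStr true =
      pvAloop text start rest (i + 1) depth inStr false := by
  rw [pvAloop.eq_def]; simp

theorem pvAloop_bs_inStr (text : String) (start : Int) (rest : List Char) (i depth : Int) :
    pvAloop text start ('\\' :: rest) i depth true false =
      pvAloop text start rest (i + 1) depth true true := by
  rw [pvAloop.eq_def]; simp

theorem pvAloop_quote (text : String) (start : Int) (rest : List Char) (i depth : Int)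
    (inStr : Bool) :
    pvAloop text start ('"' :: rest) i depth inStr false =
      pvAloop text start rest (i + 1) depth (!inStr) false := by
  rw [pvAloop.eq_def]; simp

theorem pvAloop_other_inStr (text : String) (start : Int) (ch : Char) (rest : List Char)
    (i depth : Int) (h1 : ch ≠ '\\') (h2 : ch ≠ '"') :
    pvAloop text start (ch :: rest) i depth true false =
      pvAloop text start rest (i + 1) depth true false := by
  rw [pvAloop.eq_def]; simp [h1, h2]

theorem pvAloop_lb (text : String) (start : Int) (rest : List Char) (i depth : Int) :
    pvAloop text start ('[' :: rest) i depth false false =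
      pvAloop text start rest (i + 1) (depth + 1) false false := by
  rw [pvAloop.eq_def]; simp

theorem pvAloop_rb (text : String) (start : Int) (rest : List Char) (i depth : Int) :
    pvAloop text start (']' :: rest) i depth false false =
      (if depth - 1 = 0 then some (PySem.Str.slice text (some start) (some (i + 1)))
       else pvAloop text start rest (i + 1) (depth - 1) false false) := by
  rw [pvAloop.eq_def]; simp

theorem pvAloop_other (text : String) (start : Int) (ch : Char) (rest : List Char)
    (i depth : Int) (h2 : ch ≠ '"') (h3 : ch ≠ '[') (h4 : ch ≠ ']') :
    pvAloop text start (ch :: rest) i depth false false =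
      pvAloop text start rest (i + 1) depth false false := by
  rw [pvAloop.eq_def]; simp [h2, h3, h4]

-- A's outside-string scan over a quote-free segment computes pvBscan and continues after it.
theorem pvS1 (text : String) (start : Int) :
    ∀ (seg : List Char), '"' ∉ seg → ∀ (tail : List Char) (pos k depth : Int),
      pvAloop text start (seg ++ tail) (pos + k) depth false false =
        (match pvBscan text start pos seg k depth with
         | .inl s => some s
         | .inr d' => pvAloop text start tail (pos + k + seg.length) d' false false) := by
  intro seg
  induction seg with
  | nil => intro _ tail pos k depth; simp [pvBscan]
  | cons ch rest ih =>
    intro hq tail pos k depth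
    have hq' : '"' ∉ rest := fun h => hq (by simp [h])
    have hch : ch ≠ '"' := fun h => hq (by simp [h])
    rw [List.cons_append]
    by_cases hl : ch = '['
    · subst hl
      rw [pvAloop_lb, show pos + k + 1 = pos + (k + 1) from by ring,
        ih hq' tail pos (k + 1) (depth + 1)]
      rw [show pvBscan text start pos ('[' :: rest) k depth
        = pvBscan text start pos rest (k + 1) (depth + 1) from by rw [pvBscan.eq_def]; simp]
      cases pvBscan text start pos rest (k + 1) (depth + 1) with
      | inl s => rfl
      | inr d' => simp only []; congr 1; simp only [List.length_cons]; push_cast; ring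
    · by_cases hr : ch = ']'
      · subst hr
        rw [pvAloop_rb]
        rw [show pvBscan text start pos (']' :: rest) k depth
          = (if depth - 1 = 0 then .inl (PySem.Str.slice text (some start) (some (pos + k + 1)))
             else pvBscan text start pos rest (k + 1) (depth - 1)) from by
          rw [pvBscan.eq_def]; simp]
        by_cases hd : depth - 1 = 0
        · rw [if_pos hd, if_pos hd]
        · rw [if_neg hd, if_neg hd,
            show pos + k + 1 = pos + (k + 1) from by ring,
            ih hq' tail pos (k + 1) (depth - 1)]
          cases pvBscan text start pos rest (k + 1) (depth - 1) with
          | inl s => rfl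
          | inr d' => simp only []; congr 1; simp only [List.length_cons]; push_cast; ring
      · rw [pvAloop_other text start ch (rest ++ tail) (pos + k) depth hch hl hr,
          show pos + k + 1 = pos + (k + 1) from by ring,
          ih hq' tail pos (k + 1) depth]
        rw [show pvBscan text start pos (ch :: rest) k depth
          = pvBscan text start pos rest (k + 1) depth from by
          rw [pvBscan.eq_def]; simp [hl, hr]]
        cases pvBscan text start pos rest (k + 1) depth with
        | inl s => rfl
        | inr d' => simp only []; congr 1; simp only [List.length_cons]; push_cast; ring

-- A's inside-string scan over a quote-free segment: either the escape swallows the next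
-- character after the segment (pvEscQ), or A arrives at the tail still in-string.
theorem pvS2 (text : String) (start : Int) :
    ∀ (n : Nat) (seg : List Char), seg.length ≤ n → '"' ∉ seg →
      ∀ (tail : List Char) (i depth : Int),
      pvAloop text start (seg ++ tail) i depth true false =
        (if pvEscQ seg then
          (match tail with
           | [] => none
           | _ :: t2 => pvAloop text start t2 (i + seg.length + 1) depth true false)
         else pvAloop text start tail (i + seg.length) depth true false) := by
  intro n
  induction n using Nat.strong_induction_on with
  | _ n ihn =>
    intro seg hlen hq tail i depth
    match seg with
    | [] => simp [pvEscQ]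
    | ch :: rest =>
      have hq' : '"' ∉ rest := fun h => hq (by simp [h])
      have hch : ch ≠ '"' := fun h => hq (by simp [h])
      rw [List.cons_append]
      by_cases hbs : ch = '\\'
      · subst hbs
        rw [pvAloop_bs_inStr]
        match rest, tail with
        | [], [] => simp [pvAloop_nil, pvEscQ]
        | [], x :: t2 =>
          rw [List.nil_append, pvAloop_esc]
          simp only [show pvEscQ ['\\'] = true from rfl, if_pos]
          simp only [List.length_cons, List.length_nil]
          norm_num
        | c :: r2, tail =>
          rw [List.cons_append, pvAloop_esc]
          have h2 : r2.length < n := by simp at hlen; omega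
          have hq2 : '"' ∉ r2 := fun h => hq' (by simp [h])
          rw [ihn r2.length h2 r2 le_rfl hq2 tail (i + 1 + 1) depth]
          rw [show pvEscQ ('\\' :: c :: r2) = pvEscQ r2 from rfl]
          by_cases he : pvEscQ r2 = true
          · rw [if_pos he, if_pos he]
            cases tail with
            | nil => rfl
            | cons x t2 => simp only []; congr 1; simp only [List.length_cons]; push_cast; ring
          · rw [if_neg he, if_neg he]; congr 1; simp only [List.length_cons]; push_cast; ring
      · rw [pvAloop_other_inStr text start ch (rest ++ tail) i depth hbs hch]
        have h1 : rest.length < n := by simp at hlen; omega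
        rw [ihn rest.length h1 rest le_rfl hq' tail (i + 1) depth]
        rw [show pvEscQ (ch :: rest) = pvEscQ rest from by
          rw [pvEscQ.eq_def]; cases rest <;> simp [hbs]]
        by_cases he : pvEscQ rest = true
        · rw [if_pos he, if_pos he]
          cases tail with
          | nil => rfl
          | cons x t2 => simp only []; congr 1; simp only [List.length_cons]; push_cast; ring
        · rw [if_neg he, if_neg he]; congr 1; simp only [List.length_cons]; push_cast; ring

-- Main bridge: A's flag machine over the joined segments equals B's segment loop.
theorem pvMB (text : String) (start : Int) :
    ∀ (segs : List (List Char)), (∀ s ∈ segs, '"' ∉ s) →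
      ∀ (pos depth : Int) (ins : Bool),
      pvAloop text start (pvJoinQ segs) pos depth ins false =
        pvBsegs text start segs pos depth ins := by
  intro segs
  induction segs with
  | nil => intro _ pos depth ins; cases ins <;> simp [pvJoinQ, pvAloop_nil, pvBsegs]
  | cons seg rest ih =>
    intro hq pos depth ins
    have hqs : '"' ∉ seg := hq seg (by simp)
    have hqr : ∀ s ∈ rest, '"' ∉ s := fun s hs => hq s (by simp [hs])
    cases rest with
    | nil =>
      rw [show pvJoinQ [seg] = seg ++ [] from by simp [pvJoinQ]]
      cases ins with
      | false =>
        have hS1 := pvS1 text start seg hqs [] pos 0 depth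
        simp only [add_zero] at hS1
        rw [hS1]
        rw [show pvBsegs text start [seg] pos depth false
          = (match pvBscan text start pos seg 0 depth with
             | .inl s => some s
             | .inr d' => pvBsegs text start [] (pos + seg.length + 1) d' true) from by
          rw [pvBsegs.eq_def]
          simp only [Bool.false_eq_true, if_false]]
        cases pvBscan text start pos seg 0 depth with
        | inl s => rfl
        | inr d' => simp [pvAloop_nil, pvBsegs]
      | true =>
        have hS2 := pvS2 text start seg.length seg le_rfl hqs [] pos depth
        rw [hS2]
        rw [show pvBsegs text start [seg] pos depth true
          = pvBsegs text start [] (pos + seg.length + 1) depth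
              (decide ((seg.length - (pvRstripBS seg).length) % 2 = 1)) from by
          rw [pvBsegs.eq_def]; simp]
        split_ifs <;> simp [pvAloop_nil, pvBsegs]
    | cons r rs =>
      rw [show pvJoinQ (seg :: r :: rs) = seg ++ '"' :: pvJoinQ (r :: rs) from rfl]
      cases ins with
      | false =>
        have hS1 := pvS1 text start seg hqs ('"' :: pvJoinQ (r :: rs)) pos 0 depth
        simp only [add_zero] at hS1
        rw [hS1]
        rw [show pvBsegs text start (seg :: r :: rs) pos depth false
          = (match pvBscan text start pos seg 0 depth with
             | .inl s => some s
             | .inr d' => pvBsegs text start (r :: rs) (pos + seg.length + 1) d' true) from by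
          rw [pvBsegs.eq_def]
          simp only [Bool.false_eq_true, if_false]]
        cases pvBscan text start pos seg 0 depth with
        | inl s => rfl
        | inr d' =>
          simp only []
          rw [pvAloop_quote]
          exact ih hqr (pos + seg.length + 1) d' true
      | true =>
        have hS2 := pvS2 text start seg.length seg le_rfl hqs ('"' :: pvJoinQ (r :: rs)) pos depth
        rw [hS2]
        rw [show pvBsegs text start (seg :: r :: rs) pos depth true
          = pvBsegs text start (r :: rs) (pos + seg.length + 1) depth
              (decide ((seg.length - (pvRstripBS seg).length) % 2 = 1)) from by
          rw [pvBsegs.eq_def]; simp]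
        rw [show (decide ((seg.length - (pvRstripBS seg).length) % 2 = 1)) = pvEscQ seg from by
          rw [pvEscQ_parity seg.length seg le_rfl, pvTrail_eq_sub]]
        by_cases he : pvEscQ seg = true
        · rw [if_pos he, he]
          exact ih hqr (pos + seg.length + 1) depth true
        · rw [if_neg he, show pvEscQ seg = false from by simpa using he]
          rw [pvAloop_quote]
          exact ih hqr (pos + seg.length + 1) depth false

-- ===== VERDICT (by name: the statement is the Claim_ definition above) =====
theorem find_json_array_py_spec : Claim_equal_find_json_array_py := by
  intro text _
  show find_json_array_py text = find_json_array_py_alt text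
  unfold find_json_array_py find_json_array_py_alt
  by_cases h : PySem.Str.find text "[" = -1
  · rw [if_pos h, if_pos h]
  · rw [if_neg h, if_neg h]
    set cs := text.toList.drop (PySem.Str.find text "[").toNat with hcs
    conv_lhs => rw [← pvJoinQ_splitOn cs]
    exact pvMB text _ (cs.splitOn '"') (pvSplit_no_quote cs) _ 0 false
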